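-- pv_equiv track=rewrite | github.com/KisloTAooAnkit/Python-Programs | DP2/LargestSubrectangle with equal 0s and 1s.py | findLargestRect
-- ===== SOURCE A (Python) =====
-- def maxZerosumSubarray(arr,n):
--     prefix = 0
--     dic = {0:-1}
--     ans = 0
--     for i in range(n):
--         prefix += arr[i]
--         if prefix in dic:
--             ans = max(ans,i-dic[prefix])
--         else:
--             dic[prefix] = i
--     return ans
--
-- def findLargestRect(matrix):
--
--     rows = len(matrix)
--     cols = len(matrix[0])
--
--     arr = [0]*rows
--     ans = 0
--     for i in range(rows):
--         for j in range(cols):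
--             if matrix[i][j] == 0:
--                 matrix[i][j] = -1
--     for i in range(cols):
--         for j in range(cols):
--             if i == j:
--                 for k in range(rows):
--                     arr[k] = matrix[k][i]
--             else:
--                 for k in range(rows):
--                     arr[k] += matrix[k][j]
--
--             windowSize = j-i +1
--             ans = max(ans,windowSize*maxZerosumSubarray(arr,rows))
--     return ans
-- ===== SOURCE B (Python) =====
-- # B: prefix-sum table per row; for each column pair (i <= j) the column-sum
-- # vector is read off the table directly instead of being accumulated in place.
-- # Like A, it mutates `matrix` in place (0 -> -1); equivalence is about the return value.
--
-- def _maxZeroLen(vals):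
--     best = 0
--     first = {0: -1}
--     prefix = 0
--     for i, v in enumerate(vals):
--         prefix += v
--         if prefix in first:
--             best = max(best, i - first[prefix])
--         else:
--             first[prefix] = i
--     return best
--
-- def findLargestRect(matrix):
--     rows = len(matrix)
--     cols = len(matrix[0])
--     for row in matrix:
--         for j in range(cols):
--             if row[j] == 0:
--                 row[j] = -1
--     pref = []
--     for row in matrix:
--         p = [0]
--         s = 0
--         for c in range(cols):
--             s += row[c]
--             p.append(s)
--         pref.append(p)
--     ans = 0
--     for i in range(cols):
--         for j in range(i, cols):
--             vals = [pref[k][j + 1] - pref[k][i] for k in range(rows)]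
--             ans = max(ans, (j - i + 1) * _maxZeroLen(vals))
--     return ans
-- ===== Notes on version B (the rewrite author's own statement) =====
-- stated objective: faster
-- what changed: B precomputes a per-row horizontal prefix-sum table and iterates only over ordered column pairs i<=j, reading each column-sum vector off the table, replacing A's in-place running array with its i==j reset and its dead j<i iterations.
import Mathlib
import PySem

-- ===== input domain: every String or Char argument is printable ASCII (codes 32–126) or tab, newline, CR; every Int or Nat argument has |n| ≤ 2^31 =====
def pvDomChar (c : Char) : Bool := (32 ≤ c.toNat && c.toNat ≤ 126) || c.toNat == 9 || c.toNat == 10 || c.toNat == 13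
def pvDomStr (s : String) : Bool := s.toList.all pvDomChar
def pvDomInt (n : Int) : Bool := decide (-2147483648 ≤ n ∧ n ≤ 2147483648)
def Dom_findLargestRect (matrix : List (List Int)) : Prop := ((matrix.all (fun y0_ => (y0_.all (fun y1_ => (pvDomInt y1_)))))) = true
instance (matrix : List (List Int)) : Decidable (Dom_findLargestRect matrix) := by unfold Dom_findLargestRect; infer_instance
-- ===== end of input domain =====

-- B replaces A's in-place accumulated column-sum array (with its i==j reset and
-- dead j<i iterations) by a per-row prefix-sum table read off per column pair i≤j.
-- Both Pythons mutate `matrix` in place (0 → -1); the equivalence proved here is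
-- about the return value (the ports model the mutated matrix as a fresh map; entries
-- at column index ≥ len(matrix[0]) are never read afterwards).

-- ===== PORT A =====
def maxZerosumSubarray (arr : List Int) (n : Int) : Int :=
  -- prefix = 0; dic = {0:-1}; ans = 0; for i in range(n): …
  let st := (PySem.List.pyRange 0 n 1).foldl
    (fun (s : Int × PySem.Dict Int Int × Int) i =>
      let pfx := s.1 + PySem.List.pyGetD arr i 0
      match s.2.1.get? pfx with
      | some v => (pfx, s.2.1, max s.2.2 (i - v))
      | none   => (pfx, s.2.1.insert pfx i, s.2.2))
    (0, PySem.Dict.ofList [(0, -1)], 0)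
  st.2.2

def findLargestRect (matrix : List (List Int)) : Int :=
  let rows : Int := matrix.length
  let cols : Int := (matrix.headD []).length
  -- the in-place 0→-1 mutation, as a map (entries at column index ≥ cols are never read)
  let m := matrix.map (fun row => row.map (fun x => if x = 0 then -1 else x))
  let arr0 : List Int := List.replicate matrix.length 0
  let st := (PySem.List.pyRange 0 cols 1).foldl
    (fun (s : List Int × Int) i =>
      (PySem.List.pyRange 0 cols 1).foldl
        (fun (t : List Int × Int) j =>
          let arr :=
            if i = j then
              (PySem.List.pyRange 0 rows 1).foldl
                (fun a k => PySem.List.pySetD a k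
                  (PySem.List.pyGetD (PySem.List.pyGetD m k []) i 0)) t.1
            else
              (PySem.List.pyRange 0 rows 1).foldl
                (fun a k => PySem.List.pySetD a k
                  (PySem.List.pyGetD a k 0 + PySem.List.pyGetD (PySem.List.pyGetD m k []) j 0)) t.1
          let windowSize := j - i + 1
          (arr, max t.2 (windowSize * maxZerosumSubarray arr rows)))
        s)
    (arr0, 0)
  st.2

-- ===== PORT B =====
def maxZeroLen (vals : List Int) : Int :=
  -- best = 0; first = {0:-1}; prefix = 0; for i, v in enumerate(vals): …
  let st := (PySem.List.enumerate vals 0).foldl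
    (fun (s : Int × PySem.Dict Int Int × Int) p =>
      let pfx := s.2.2 + p.2
      match s.2.1.get? pfx with
      | some v => (max s.1 (p.1 - v), s.2.1, pfx)
      | none   => (s.1, s.2.1.insert pfx p.1, pfx))
    (0, PySem.Dict.ofList [(0, -1)], 0)
  st.1

def prefixRow (row : List Int) (cols : Nat) : List Int :=
  -- p = [0]; s = 0; for c in range(cols): s += row[c]; p.append(s)
  let st := (List.range cols).foldl
    (fun (st : List Int × Int) c =>
      let s := st.2 + row.getD c 0
      (st.1 ++ [s], s)) ([0], 0)
  st.1

def findLargestRect_alt (matrix : List (List Int)) : Int :=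
  let rows := matrix.length
  let cols := (matrix.headD []).length
  -- the in-place 0→-1 mutation, as a map (entries at column index ≥ cols are never read)
  let m := matrix.map (fun row => row.map (fun x => if x = 0 then -1 else x))
  let pref := m.map (fun row => prefixRow row cols)
  (List.range cols).foldl
    (fun ans i =>
      (List.range' i (cols - i)).foldl
        (fun ans j =>
          let vals := (List.range rows).map (fun k =>
            (pref.getD k []).getD (j + 1) 0 - (pref.getD k []).getD i 0)
          max ans (((j : Int) - (i : Int) + 1) * maxZeroLen vals))
        ans)
    0

-- ===== PRECONDITION & SPEC =====
-- Pre_: matrix is nonempty (A reads matrix[0]) and every row has at least as many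
-- entries as the first row (A indexes matrix[k][j] for j < len(matrix[0]));
-- otherwise A raises IndexError.
def Pre_findLargestRect (matrix : List (List Int)) : Prop :=
  matrix ≠ [] ∧ ∀ row ∈ matrix, (matrix.headD []).length ≤ row.length
instance (matrix : List (List Int)) : Decidable (Pre_findLargestRect matrix) := by
  unfold Pre_findLargestRect; infer_instance

def pvWitness_findLargestRect : List (List Int) := [[1, 0, 1], [0, 1, 0]]

def Spec_findLargestRect (matrix : List (List Int)) (out : Int) : Prop := out = findLargestRect_alt matrix
instance (matrix : List (List Int)) (out : Int) : Decidable (Spec_findLargestRect matrix out) := by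
  unfold Spec_findLargestRect; infer_instance

-- ===== CLAIM (what is proved, stated in full; the proofs are below) =====
def Claim_equal_findLargestRect : Prop := ∀ (matrix : List (List Int)), Dom_findLargestRect matrix → Pre_findLargestRect matrix → Spec_findLargestRect matrix (findLargestRect matrix)

-- ===== LEMMAS AND PROOFS =====


-- column value of the (already 0→-1 mapped) matrix
def pvMv (m : List (List Int)) (k c : Nat) : Int := (m.getD k []).getD c 0

-- the column-sum vector over columns i..j
def pvSeg (m : List (List Int)) (R i j : Nat) : List Int :=
  (List.range R).map (fun k => ((List.range' i (j + 1 - i)).map (fun c => pvMv m k c)).sum)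

-- A's inner-loop body, at the Nat level
def pvStepA (m : List (List Int)) (R i : Nat) (t : List Int × Int) (j : Nat) : List Int × Int :=
  let arr := if i = j then (List.range R).foldl (fun a k => a.set k (pvMv m k i)) t.1
             else (List.range R).foldl (fun a k => a.set k (a.getD k 0 + pvMv m k j)) t.1
  (arr, max t.2 (((j : Int) - (i : Int) + 1) * maxZerosumSubarray arr (R : Int)))

def pvPsum (row : List Int) (c : Nat) : Int := ((List.range c).map (fun t => row.getD t 0)).sum

lemma pv_msz_nonneg (arr : List Int) (n : Int) : 0 ≤ maxZerosumSubarray arr n := by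
  unfold maxZerosumSubarray
  have h : ∀ (l : List Int) (s : Int × PySem.Dict Int Int × Int),
      s.2.2 ≤ (l.foldl (fun (s : Int × PySem.Dict Int Int × Int) i =>
        let pfx := s.1 + PySem.List.pyGetD arr i 0
        match s.2.1.get? pfx with
        | some v => (pfx, s.2.1, max s.2.2 (i - v))
        | none   => (pfx, s.2.1.insert pfx i, s.2.2)) s).2.2 := by
    intro l
    induction l with
    | nil => intro s; simp
    | cons x xs ih =>
      intro s
      rw [List.foldl_cons]
      refine le_trans ?_ (ih _)
      cases h : s.2.1.get? (s.1 + PySem.List.pyGetD arr x 0) with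
      | none => simp [h]
      | some v => simp [h]
  exact h _ _
lemma pv_helper_fold (g : Int → Int) (l : List Int) : ∀ (p : Int) (d : PySem.Dict Int Int) (a : Int),
  (l.foldl (fun (s : Int × PySem.Dict Int Int × Int) i =>
      let pfx := s.1 + g i
      match s.2.1.get? pfx with
      | some v => (pfx, s.2.1, max s.2.2 (i - v))
      | none   => (pfx, s.2.1.insert pfx i, s.2.2)) (p, d, a)).2.2
  = (l.foldl (fun (s : Int × PySem.Dict Int Int × Int) i =>
      let pfx := s.2.2 + g i
      match s.2.1.get? pfx with
      | some v => (max s.1 (i - v), s.2.1, pfx)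
      | none   => (s.1, s.2.1.insert pfx i, pfx)) (a, d, p)).1 := by
  induction l with
  | nil => intro p d a; rfl
  | cons x xs ih =>
    intro p d a
    rw [List.foldl_cons, List.foldl_cons]
    cases h : d.get? (p + g x) with
    | none => simpa [h] using ih _ _ _
    | some v => simpa [h] using ih _ _ _

lemma pv_msz_eq (arr : List Int) : maxZerosumSubarray arr (arr.length : Int) = maxZeroLen arr := by
  unfold maxZerosumSubarray maxZeroLen
  rw [PySem.List.enumerate_eq_map_pyRange arr 0, List.foldl_map]
  simp only [PySem.List.len_eq]
  exact pv_helper_fold (fun i => PySem.List.pyGetD arr i 0) (PySem.List.pyRange 0 (arr.length : Int) 1) 0 (PySem.Dict.ofList [(0, -1)]) 0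
lemma pv_prefixRow_eq (row : List Int) (n : Nat) :
  prefixRow row n = (List.range (n + 1)).map (pvPsum row) := by
  have h : ∀ k, (List.range k).foldl
      (fun (st : List Int × Int) c => (st.1 ++ [st.2 + row.getD c 0], st.2 + row.getD c 0)) ([0], 0)
      = ((List.range (k + 1)).map (pvPsum row), pvPsum row k) := by
    intro k
    induction k with
    | zero => simp [pvPsum]
    | succ k ih =>
      rw [List.range_succ, List.foldl_append, ih]
      have hps : pvPsum row (k + 1) = pvPsum row k + row.getD k 0 := by
        simp [pvPsum, List.range_succ]
      simp only [List.foldl_cons, List.foldl_nil]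
      rw [List.range_succ (n := k + 1), List.map_append, ← hps]
      simp
  unfold prefixRow
  rw [h]

lemma pv_foldl_set_update (u : Nat → Int → Int) (arr : List Int) :
  ∀ (n : Nat), n ≤ arr.length →
  (List.range n).foldl (fun a k => a.set k (u k (a.getD k 0))) arr
  = ((List.range n).map (fun k => u k (arr.getD k 0))) ++ arr.drop n := by
  intro n
  induction n with
  | zero => simp
  | succ n ih =>
    intro h
    rw [List.range_succ, List.foldl_append, ih (by omega)]
    simp only [List.foldl_cons, List.foldl_nil]
    have hn : n < arr.length := by omega
    have hd : arr.drop n = arr[n] :: arr.drop (n + 1) := List.drop_eq_getElem_cons hn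
    have hlenp : ((List.range n).map (fun k => u k (arr.getD k 0))).length = n := by simp
    rw [hd]
    have hget : (((List.range n).map (fun k => u k (arr.getD k 0))) ++ arr[n] :: arr.drop (n + 1)).getD n 0 = arr[n] := by
      rw [List.getD_eq_getElem?_getD, List.getElem?_append_right (by omega), hlenp]
      simp [List.getElem?_eq_getElem hn]
    rw [hget, List.set_append_right _ _ (by omega), hlenp]
    simp only [Nat.sub_self, List.set_cons_zero]
    have hgd : arr.getD n 0 = arr[n] := by
      rw [List.getD_eq_getElem?_getD, List.getElem?_eq_getElem hn]; rfl
    rw [List.map_append]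
    simp [List.getElem?_eq_getElem hn]
lemma pv_length_pvSeg (m : List (List Int)) (R i j : Nat) : (pvSeg m R i j).length = R := by
  simp [pvSeg]

lemma pv_getD_pvSeg (m : List (List Int)) (R i j k : Nat) (hk : k < R) :
  (pvSeg m R i j).getD k 0 = ((List.range' i (j + 1 - i)).map (fun c => pvMv m k c)).sum := by
  unfold pvSeg
  exact PySem.List.getD_map_range _ _ _ _ hk

lemma pv_reset_eq (m : List (List Int)) (R i : Nat) (arr : List Int) (h : arr.length = R) :
  (List.range R).foldl (fun a k => a.set k (pvMv m k i)) arr = pvSeg m R i i := by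
  have := pv_foldl_set_update (fun k _ => pvMv m k i) arr R (by omega)
  rw [this, ← h, List.drop_length, List.append_nil]
  unfold pvSeg
  apply List.map_congr_left
  intro k _
  have : i + 1 - i = 1 := by omega
  rw [this, List.range'_one]
  simp

lemma pv_accum_eq (m : List (List Int)) (R i j : Nat) (hij : i ≤ j) :
  (List.range R).foldl (fun a k => a.set k (a.getD k 0 + pvMv m k (j + 1))) (pvSeg m R i j)
  = pvSeg m R i (j + 1) := by
  rw [pv_foldl_set_update (fun k x => x + pvMv m k (j + 1)) _ R (by rw [pv_length_pvSeg])]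
  have hdrop : List.drop R (pvSeg m R i j) = [] :=
    List.drop_eq_nil_of_le (by rw [pv_length_pvSeg])
  rw [hdrop, List.append_nil]
  apply List.map_congr_left
  intro k hk
  rw [List.mem_range] at hk
  rw [pv_getD_pvSeg m R i j k hk]
  show _ = ((List.range' i (j + 1 + 1 - i)).map (fun c => pvMv m k c)).sum
  have h1 : j + 1 + 1 - i = (j + 1 - i) + 1 := by omega
  rw [h1, List.range'_1_concat, List.map_append, List.sum_append]
  have h2 : i + (j + 1 - i) = j + 1 := by omega
  simp [h2]
lemma pv_inner2 (m : List (List Int)) (R i : Nat) :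
  ∀ (t : Nat) (arr : List Int) (ans : Int), arr.length = R →
  (List.range' i (t + 1)).foldl (pvStepA m R i) (arr, ans)
  = (pvSeg m R i (i + t),
     (List.range' i (t + 1)).foldl (fun a (j : Nat) =>
       max a (((j : Int) - (i : Int) + 1) * maxZerosumSubarray (pvSeg m R i j) (R : Int))) ans) := by
  intro t
  induction t with
  | zero =>
    intro arr ans h
    rw [List.range'_one]
    simp only [List.foldl_cons, List.foldl_nil, pvStepA, if_pos]
    rw [pv_reset_eq m R i arr h]
    simp
  | succ t ih =>
    intro arr ans h
    rw [List.range'_1_concat, List.foldl_append, List.foldl_append, ih arr ans h]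
    simp only [List.foldl_cons, List.foldl_nil]
    have hne : i ≠ i + (t + 1) := by omega
    rw [pvStepA, if_neg hne]
    have hacc : (List.range R).foldl (fun a k => a.set k (a.getD k 0 + pvMv m k (i + (t + 1))))
        (pvSeg m R i (i + t)) = pvSeg m R i (i + (t + 1)) := by
      have := pv_accum_eq m R i (i + t) (by omega)
      simpa [Nat.add_assoc] using this
    simp only [hacc]

lemma pv_inner1 (m : List (List Int)) (R i : Nat) :
  ∀ (l : List Nat), (∀ j ∈ l, j < i) → ∀ (arr : List Int) (ans : Int), arr.length = R → 0 ≤ ans →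
  ∃ arr', arr'.length = R ∧ l.foldl (pvStepA m R i) (arr, ans) = (arr', ans) := by
  intro l
  induction l with
  | nil =>
    intro _ arr ans h _
    exact ⟨arr, h, rfl⟩
  | cons j l ih =>
    intro hl arr ans h hans
    have hj : j < i := hl j (by simp)
    rw [List.foldl_cons, pvStepA, if_neg (by omega)]
    have harr1 : ((List.range R).foldl (fun a k => a.set k (a.getD k 0 + pvMv m k j)) arr).length = R := by
      rw [pv_foldl_set_update (fun k x => x + pvMv m k j) arr R (by omega)]
      simp [h]
    have hans1 : max ans (((j : Int) - (i : Int) + 1) *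
        maxZerosumSubarray ((List.range R).foldl (fun a k => a.set k (a.getD k 0 + pvMv m k j)) arr) (R : Int)) = ans := by
      apply max_eq_left
      have hw : ((j : Int) - (i : Int) + 1) ≤ 0 := by
        have : (j : Int) + 1 ≤ (i : Int) := by exact_mod_cast hj
        omega
      calc ((j : Int) - (i : Int) + 1) * _ ≤ 0 :=
            mul_nonpos_of_nonpos_of_nonneg hw (pv_msz_nonneg _ _)
        _ ≤ ans := hans
    rw [hans1]
    exact ih (fun x hx => hl x (by simp [hx])) _ ans harr1 hans
lemma pv_vals_eq (m : List (List Int)) (C i j : Nat) (hi : i ≤ j) (hj : j < C) :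
  (List.range m.length).map (fun k =>
      ((m.map (fun row => prefixRow row C)).getD k []).getD (j + 1) 0
    - ((m.map (fun row => prefixRow row C)).getD k []).getD i 0)
  = pvSeg m m.length i j := by
  unfold pvSeg
  apply List.map_congr_left
  intro k hk
  rw [List.mem_range] at hk
  have hpref : (m.map (fun row => prefixRow row C)).getD k [] = prefixRow (m.getD k []) C := by
    rw [List.getD_eq_getElem?_getD, List.getElem?_map, List.getElem?_eq_getElem hk]
    rw [List.getD_eq_getElem?_getD, List.getElem?_eq_getElem hk]
    rfl
  rw [hpref, pv_prefixRow_eq]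
  rw [PySem.List.getD_map_range _ _ _ _ (by omega), PySem.List.getD_map_range _ _ _ _ (by omega)]
  have hsplit : List.range (j + 1) = List.range i ++ List.range' i (j + 1 - i) := by
    rw [List.range_eq_range', List.range_eq_range']
    have h2 : i + (j + 1 - i) = j + 1 := by omega
    calc List.range' 0 (j + 1) = List.range' 0 (i + (j + 1 - i)) := by rw [h2]
      _ = List.range' 0 i ++ List.range' (0 + 1 * i) (j + 1 - i) := (List.range'_append).symm
      _ = List.range' 0 i ++ List.range' i (j + 1 - i) := by norm_num
  unfold pvPsum pvMv
  rw [hsplit, List.map_append, List.sum_append]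
  ring
lemma pv_outer (m : List (List Int)) (C : Nat) :
  ∀ (l : List Nat), (∀ i ∈ l, i < C) → ∀ (arr : List Int) (ans : Int), arr.length = m.length → 0 ≤ ans →
  (l.foldl (fun (s : List Int × Int) (i : Nat) => (List.range C).foldl (pvStepA m m.length i) s) (arr, ans)).2
  = l.foldl (fun (a : Int) (i : Nat) => (List.range' i (C - i)).foldl (fun a (j : Nat) =>
      max a (((j : Int) - (i : Int) + 1) * maxZeroLen ((List.range m.length).map (fun k =>
        ((m.map (fun row => prefixRow row C)).getD k []).getD (j + 1) 0
      - ((m.map (fun row => prefixRow row C)).getD k []).getD i 0)))) a) ans := by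
  intro l
  induction l with
  | nil => intro _ arr ans _ _; rfl
  | cons i l ih =>
    intro hl arr ans harr hans
    have hiC : i < C := hl i (by simp)
    have hsplit : List.range C = List.range' 0 i ++ List.range' i (C - i) := by
      rw [List.range_eq_range']
      have h2 : i + (C - i) = C := by omega
      calc List.range' 0 C = List.range' 0 (i + (C - i)) := by rw [h2]
        _ = List.range' 0 i ++ List.range' (0 + 1 * i) (C - i) := (List.range'_append).symm
        _ = List.range' 0 i ++ List.range' i (C - i) := by norm_num
    obtain ⟨arr', harr', heq⟩ := pv_inner1 m m.length i (List.range' 0 i)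
      (by intro x hx; rw [List.mem_range'_1] at hx; omega) arr ans harr hans
    have ht : C - i = (C - i - 1) + 1 := by omega
    have hcong : (List.range' i (C - i)).foldl (fun a (j : Nat) =>
        max a (((j : Int) - (i : Int) + 1) * maxZerosumSubarray (pvSeg m m.length i j) ((m.length : Nat) : Int))) ans
      = (List.range' i (C - i)).foldl (fun a (j : Nat) =>
        max a (((j : Int) - (i : Int) + 1) * maxZeroLen ((List.range m.length).map (fun k =>
          ((m.map (fun row => prefixRow row C)).getD k []).getD (j + 1) 0
        - ((m.map (fun row => prefixRow row C)).getD k []).getD i 0)))) ans := by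
      apply PySem.List.foldl_congr_mem
      intro a j hjmem
      rw [List.mem_range'_1] at hjmem
      have hij : i ≤ j := hjmem.1
      have hjC : j < C := by omega
      rw [pv_vals_eq m C i j hij hjC]
      rw [← pv_msz_eq (pvSeg m m.length i j)]
      rw [pv_length_pvSeg]
    have hhead : (List.range C).foldl (pvStepA m m.length i) (arr, ans)
        = (pvSeg m m.length i (i + (C - i - 1)),
           (List.range' i (C - i)).foldl (fun a (j : Nat) =>
             max a (((j : Int) - (i : Int) + 1) * maxZeroLen ((List.range m.length).map (fun k =>
               ((m.map (fun row => prefixRow row C)).getD k []).getD (j + 1) 0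
             - ((m.map (fun row => prefixRow row C)).getD k []).getD i 0)))) ans) := by
      conv_lhs => rw [hsplit]
      rw [List.foldl_append, heq]
      conv_lhs => rw [ht]
      rw [pv_inner2 m m.length i (C - i - 1) arr' ans harr', ← ht]
      exact congrArg (Prod.mk _) hcong
    rw [List.foldl_cons, List.foldl_cons, hhead]
    apply ih (fun x hx => hl x (by simp [hx])) _ _ (pv_length_pvSeg m m.length i _)
    refine le_trans hans ?_
    refine le_trans ?_ (le_of_eq hcong)
    exact (PySem.List.le_foldl_max_int (List.range' i (C - i)) _ ans).1
lemma pv_ports_eq (matrix : List (List Int)) :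
  findLargestRect matrix = findLargestRect_alt matrix := by
  unfold findLargestRect findLargestRect_alt
  simp only [PySem.List.pyRange_zero_nat, List.foldl_map, PySem.List.pySetD_natCast,
    PySem.List.pyGetD_natCast, Nat.cast_inj]
  have hR : matrix.length = (matrix.map (fun row => row.map fun x => if x = 0 then -1 else x)).length := by
    simp
  rw [hR]
  exact pv_outer (matrix.map (fun row => row.map fun x => if x = 0 then -1 else x))
    ((matrix.headD []).length) (List.range ((matrix.headD []).length))
    (fun i hi => List.mem_range.mp hi)
    (List.replicate (matrix.map (fun row => row.map fun x => if x = 0 then -1 else x)).length 0) 0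
    (by simp) le_rfl

-- ===== VERDICT (by name: the statement is the Claim_ definition above) =====
theorem findLargestRect_spec : Claim_equal_findLargestRect := by
  intro matrix _ _
  unfold Spec_findLargestRect
  exact pv_ports_eq matrix
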